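-- pv_equiv track=rewrite | github.com/Dethcrvsh/advent-of-code-2024 | day-9.py | get_free_memory
-- ===== SOURCE A (Python) =====
-- from typing import DefaultDict
--
-- def get_free_memory(disk):
--     mem = DefaultDict(int)
--     index = 0
--     free = 0
--     for i, c in enumerate(disk):
--         if c == ".":
--             if free == 0:
--                 index = i
--             free += 1
--             continue
--         if free > 0:
--             mem[index] = free
--         free = 0
--     return mem
-- ===== SOURCE B (Python) =====
-- from typing import DefaultDict
--
--
-- def get_free_memory(disk):
--     mem = DefaultDict(int)
--     # compress the disk into maximal runs (is_free, length), then emit every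
--     # free run except a trailing one
--     runs = []
--     for c in disk:
--         k = c == "."
--         if runs and runs[-1][0] == k:
--             runs[-1] = (k, runs[-1][1] + 1)
--         else:
--             runs.append((k, 1))
--     pos = 0
--     for i, (is_free, n) in enumerate(runs):
--         if is_free and i < len(runs) - 1:
--             mem[pos] = n
--         pos += n
--     return mem
-- ===== Notes on version B (the rewrite author's own statement) =====
-- stated objective: alternative
-- what changed: B first compresses the disk into run-length pairs (is_free, length) and then emits every free run except a trailing one, instead of A's single scan with index/free state variables and transition logic.
import Mathlib
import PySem

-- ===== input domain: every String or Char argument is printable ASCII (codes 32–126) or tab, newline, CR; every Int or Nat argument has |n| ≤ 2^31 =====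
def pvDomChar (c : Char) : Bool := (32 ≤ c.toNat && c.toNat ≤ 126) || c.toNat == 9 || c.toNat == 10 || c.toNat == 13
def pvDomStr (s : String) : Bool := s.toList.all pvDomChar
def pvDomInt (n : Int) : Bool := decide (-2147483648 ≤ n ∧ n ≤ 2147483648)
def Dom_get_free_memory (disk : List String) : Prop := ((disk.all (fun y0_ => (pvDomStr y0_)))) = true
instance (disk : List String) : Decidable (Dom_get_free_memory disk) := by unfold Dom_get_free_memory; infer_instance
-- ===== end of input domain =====

-- B replaces A's stateful scan (index/free transition variables) by run-length
-- compression followed by emitting every non-trailing free run (objective: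
-- alternative decomposition, same cost).

-- ===== PORT A =====
-- the for-loop of A: state (mem, index, free), i the enumerate counter
def goA : List String → Int → Int → Int → PySem.Dict Int Int → PySem.Dict Int Int
  | [], _, _, _, mem => mem
  | c :: t, i, index, free, mem =>
    if c == "." then
      goA t (i + 1) (if free == 0 then i else index) (free + 1) mem
    else
      goA t (i + 1) index 0 (if free > 0 then mem.insert index free else mem)

def get_free_memory (disk : List String) : List (Int × Int) :=
  (goA disk 0 0 0 PySem.Dict.empty).items

-- ===== PORT B =====
-- one step of B's first loop; the accumulator is Python's `runs` kept reversed
-- (Lean cons/modify at the head = Python append/modify at the end)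
def runStep (acc : List (Bool × Int)) (k : Bool) : List (Bool × Int) :=
  match acc with
  | (b, n) :: rest => if b == k then (b, n + 1) :: rest else (k, 1) :: (b, n) :: rest
  | [] => [(k, 1)]

-- B's second loop: i the enumerate counter, total = len(runs)
def loopB (total : Nat) : Nat → List (Bool × Int) → PySem.Dict Int Int → Int → PySem.Dict Int Int
  | _, [], mem, _ => mem
  | i, (b, n) :: rs, mem, pos =>
    loopB total (i + 1) rs (if b && decide (i < total - 1) then mem.insert pos n else mem) (pos + n)

-- B's second loop over the finished run list (runs = len(runs) is fixed there)
def emitRuns (runs : List (Bool × Int)) : List (Int × Int) :=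
  (loopB runs.length 0 runs PySem.Dict.empty 0).items

def get_free_memory_alt (disk : List String) : List (Int × Int) :=
  emitRuns ((disk.foldl (fun acc c => runStep acc (c == ".")) []).reverse)

-- ===== PRECONDITION & SPEC =====
def Spec_get_free_memory (disk : List String) (out : List (Int × Int)) : Prop := out = get_free_memory_alt disk
instance (disk : List String) (out : List (Int × Int)) : Decidable (Spec_get_free_memory disk out) := by unfold Spec_get_free_memory; infer_instance

-- ===== CLAIM (what is proved, stated in full; the proofs are below) =====
def Claim_equal_get_free_memory : Prop := ∀ (disk : List String), Dom_get_free_memory disk → Spec_get_free_memory disk (get_free_memory disk)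

-- ===== LEMMAS AND PROOFS =====

-- merge one run (k, m) into the front of a run list
def mergeRun : Bool × Int → List (Bool × Int) → List (Bool × Int)
  | (k, m), (b, n) :: rest => if b == k then (b, n + m) :: rest else (k, m) :: (b, n) :: rest
  | (k, m), [] => [(k, m)]

-- spec middleman: run-length compression of the disk, built back-to-front
def runsOf : List String → List (Bool × Int)
  | [] => []
  | c :: t => mergeRun (c == ".", 1) (runsOf t)

-- emit every run except the last one; insert the free runs into the dict
def emitE : PySem.Dict Int Int → List (Bool × Int) → Int → PySem.Dict Int Int
  | mem, [], _ => mem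
  | mem, [_], _ => mem
  | mem, (b, n) :: r :: rs, pos =>
    emitE (if b then mem.insert pos n else mem) (r :: rs) (pos + n)

theorem mergeRun_head (k : Bool) (m : Int) (rs : List (Bool × Int)) :
    ∃ n rest, mergeRun (k, m) rs = (k, n) :: rest := by
  match rs with
  | [] => exact ⟨m, [], rfl⟩
  | (b, n) :: rest =>
    by_cases hb : b = k
    · subst hb; exact ⟨n + m, rest, by simp [mergeRun]⟩
    · exact ⟨m, (b, n) :: rest, by simp [mergeRun, hb]⟩

theorem mergeRun_mergeRun (k : Bool) (m : Int) (rs : List (Bool × Int)) :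
    mergeRun (k, m) (mergeRun (k, 1) rs) = mergeRun (k, m + 1) rs := by
  match rs with
  | [] => simp [mergeRun, Int.add_comm]
  | (b, n) :: rest =>
    by_cases hb : b = k
    · subst hb; simp [mergeRun, Int.add_comm, Int.add_left_comm]
    · simp [mergeRun, hb, Int.add_comm]

theorem emitE_skip_false (rs : List (Bool × Int)) (mem : PySem.Dict Int Int) (pos m : Int) :
    emitE mem (mergeRun (false, m) rs) pos = emitE mem rs (pos + m) := by
  match rs with
  | [] => simp [mergeRun, emitE]
  | (false, n) :: [] => simp [mergeRun, emitE]
  | (false, n) :: r :: rest' =>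
    simp [mergeRun, emitE, Int.add_comm, Int.add_left_comm]
  | (true, n) :: [] => simp [mergeRun, emitE]
  | (true, n) :: r :: rest' =>
    simp [mergeRun, emitE, Int.add_comm, Int.add_left_comm]

-- A's loop computes exactly emitE over the run decomposition
theorem goA_eq_emitE (l : List String) :
    (∀ (i index : Int) (mem : PySem.Dict Int Int),
        goA l i index 0 mem = emitE mem (runsOf l) i) ∧
    (∀ (index free : Int) (mem : PySem.Dict Int Int), 1 ≤ free →
        goA l (index + free) index free mem = emitE mem (mergeRun (true, free) (runsOf l)) index) := by
  induction l with
  | nil =>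
    constructor
    · intro i index mem; simp [goA, runsOf, emitE]
    · intro index free mem _; simp [goA, runsOf, mergeRun, emitE]
  | cons c t ih =>
    refine ⟨?_, ?_⟩
    · intro i index mem
      by_cases hk : (c == ".") = true
      · rw [show goA (c :: t) i index 0 mem = goA t (i + 1) i 1 mem from by
          simp [goA, hk]]
        rw [(ih.2) i 1 mem (by norm_num)]
        simp only [runsOf, hk]
      · have hk' : (c == ".") = false := by simpa using hk
        rw [show goA (c :: t) i index 0 mem = goA t (i + 1) index 0 mem from by
          simp [goA, hk']]
        rw [(ih.1) (i + 1) index mem]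
        simp only [runsOf, hk']
        rw [emitE_skip_false]
    · intro index free mem hfree
      by_cases hk : (c == ".") = true
      · have h0 : (free == 0) = false := by simp; omega
        rw [show goA (c :: t) (index + free) index free mem
              = goA t (index + free + 1) index (free + 1) mem from by
            simp [goA, hk, h0]]
        rw [show index + free + 1 = index + (free + 1) from by ring]
        rw [(ih.2) index (free + 1) mem (by omega)]
        simp only [runsOf, hk]
        rw [mergeRun_mergeRun]
      · have hk' : (c == ".") = false := by simpa using hk
        rw [show goA (c :: t) (index + free) index free mem
              = goA t (index + free + 1) index 0 (mem.insert index free) from by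
            simp [goA, hk', show (0:Int) < free from by omega]]
        rw [(ih.1) (index + free + 1) index (mem.insert index free)]
        simp only [runsOf, hk']
        obtain ⟨n, rest, hrw⟩ := mergeRun_head false 1 (runsOf t)
        rw [hrw]
        rw [show mergeRun (true, free) ((false, n) :: rest)
              = (true, free) :: (false, n) :: rest from by simp [mergeRun]]
        rw [show emitE mem ((true, free) :: (false, n) :: rest) index
              = emitE (mem.insert index free) ((false, n) :: rest) (index + free) from by
            simp [emitE]]
        rw [← hrw, emitE_skip_false]

-- B's run list (reversed foldl accumulator) is runsOf
theorem foldl_runStep (l : List String) (hd : Bool × Int) (acc : List (Bool × Int)) :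
    List.foldl (fun a c => runStep a (c == ".")) (hd :: acc) l
      = (mergeRun hd (runsOf l)).reverse ++ acc := by
  induction l generalizing hd acc with
  | nil => cases hd; simp [runsOf, mergeRun]
  | cons c t ih =>
    obtain ⟨b, n⟩ := hd
    by_cases hb : b = (c == ".")
    · have hbe : (b == (c == ".")) = true := by simp [hb]
      rw [show List.foldl (fun a c => runStep a (c == ".")) ((b, n) :: acc) (c :: t)
            = List.foldl (fun a c => runStep a (c == ".")) ((b, n + 1) :: acc) t from by
          simp [runStep, hb]]
      rw [ih (b, n + 1) acc]
      simp only [runsOf]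
      rw [← hb, mergeRun_mergeRun]
    · have hbe : (b == (c == ".")) = false := by simp [hb]
      have hbe2 : ((c == ".") == b) = false := by simp [beq_eq_false_iff_ne]; exact fun h => hb h.symm
      rw [show List.foldl (fun a c => runStep a (c == ".")) ((b, n) :: acc) (c :: t)
            = List.foldl (fun a c => runStep a (c == ".")) ((c == ".", 1) :: (b, n) :: acc) t from by
          simp [runStep, hb]]
      rw [ih ((c == "."), 1) ((b, n) :: acc)]
      simp only [runsOf]
      obtain ⟨m, rest, hrw⟩ := mergeRun_head (c == ".") 1 (runsOf t)
      rw [hrw, show mergeRun (b, n) (((c == "."), m) :: rest)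
            = (b, n) :: ((c == "."), m) :: rest from by simp [mergeRun, hbe2]]
      simp

theorem runs_eq_runsOf (l : List String) :
    (List.foldl (fun a c => runStep a (c == ".")) [] l).reverse = runsOf l := by
  cases l with
  | nil => rfl
  | cons c t =>
    rw [show List.foldl (fun a c => runStep a (c == ".")) [] (c :: t)
          = List.foldl (fun a c => runStep a (c == ".")) [((c == "."), 1)] t from by
        rw [List.foldl_cons]; rfl]
    rw [foldl_runStep t ((c == "."), 1) []]
    simp [runsOf]

theorem loopB_eq_emitE (rs : List (Bool × Int)) :
    ∀ (total i : Nat) (mem : PySem.Dict Int Int) (pos : Int), total = i + rs.length →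
      loopB total i rs mem pos = emitE mem rs pos := by
  induction rs with
  | nil => intro total i mem pos _; simp [loopB, emitE]
  | cons hd rs' ih =>
    intro total i mem pos htot
    obtain ⟨b, n⟩ := hd
    cases rs' with
    | nil =>
      have hc : ¬ (i < total - 1) := by simp at htot; omega
      simp [loopB, hc, emitE]
    | cons r rs'' =>
      have hc : (i < total - 1) := by simp at htot; omega
      rw [show loopB total i ((b, n) :: r :: rs'') mem pos
            = loopB total (i + 1) (r :: rs'')
                (if b && decide (i < total - 1) then mem.insert pos n else mem) (pos + n) from rfl]
      rw [ih total (i + 1) _ _ (by simp at htot ⊢; omega)]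
      rw [show (b && decide (i < total - 1)) = b from by simp [hc]]
      cases b <;> simp [emitE]

-- ===== VERDICT (by name: the statement is the Claim_ definition above) =====
theorem get_free_memory_spec : Claim_equal_get_free_memory := by
  intro disk _
  unfold Spec_get_free_memory get_free_memory get_free_memory_alt emitRuns
  rw [(goA_eq_emitE disk).1 0 0 PySem.Dict.empty]
  rw [runs_eq_runsOf]
  rw [loopB_eq_emitE (runsOf disk) _ 0 _ 0 (by simp)]
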